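-- pv_equiv track=rewrite | github.com/morzh/fitMate-motion2text | MotionBERT/lib/data/interpolation.py | save_each_n_skeletons
-- ===== SOURCE A (Python) =====
-- def save_each_n_skeletons(skeletons: list) -> list:
--     new_skeletons = [skeletons[0]]
--     n_take_only_each = 4
--
--     empty_list = [None for _ in range(n_take_only_each - 1)]
--     for sk in skeletons[1::n_take_only_each]:
--         new_skeletons.extend(empty_list)
--         new_skeletons.append(sk)
--     return new_skeletons
-- ===== SOURCE B (Python) =====
-- def save_each_n_skeletons(skeletons: list) -> list:
--     # Closed-form: output slot j holds skeletons[0] at j=0, skeletons[j-3] at each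
--     # later multiple of 4, and None elsewhere; length is 4*ceil((len-1)/4)+1.
--     m = (len(skeletons) + 2) // 4
--     return [skeletons[0] if j == 0 else skeletons[j - 3] if j % 4 == 0 else None
--             for j in range(4 * m + 1)]
-- ===== Notes on version B (the rewrite author's own statement) =====
-- stated objective: alternative
-- what changed: B never iterates or slices the input: it computes the output length in closed form (4*ceil((n-1)/4)+1) and generates each output slot directly from its index j (skeletons[0] at j=0, skeletons[j-3] at later multiples of 4, None elsewhere), instead of A's slice-then-append loop that extends the list block by block.
import Mathlib
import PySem

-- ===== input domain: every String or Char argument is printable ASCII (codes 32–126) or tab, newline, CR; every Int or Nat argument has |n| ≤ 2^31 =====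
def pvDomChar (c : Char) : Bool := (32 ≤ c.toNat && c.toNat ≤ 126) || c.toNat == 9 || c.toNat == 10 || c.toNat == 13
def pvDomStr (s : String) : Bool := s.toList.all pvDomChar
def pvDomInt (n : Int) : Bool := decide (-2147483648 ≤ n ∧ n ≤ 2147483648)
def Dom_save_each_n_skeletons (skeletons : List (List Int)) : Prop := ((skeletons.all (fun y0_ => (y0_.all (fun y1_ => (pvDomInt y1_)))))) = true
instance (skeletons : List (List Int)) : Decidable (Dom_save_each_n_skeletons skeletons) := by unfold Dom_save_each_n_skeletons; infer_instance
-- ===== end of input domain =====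

-- B computes each output slot directly from its index in closed form instead of A's
-- slice-then-append loop (alternative decomposition, same asymptotic cost).

-- ===== PORT A =====
def save_each_n_skeletons (skeletons : List (List Int)) : List (Option (List Int)) :=
  match PySem.List.pyGet? skeletons 0 with
  | none => []   -- skeletons[0] raises IndexError on []; excluded by Pre_
  | some first =>
    -- empty_list = [None for _ in range(4 - 1)]
    let emptyList : List (Option (List Int)) := (List.range 3).map (fun _ => none)
    let sub := (PySem.List.slice? skeletons (some 1) none 4).getD []
    sub.foldl (fun acc sk => (acc ++ emptyList) ++ [some sk]) [some first]

-- ===== PORT B =====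
-- pyGet? returning none is Python's IndexError; under Pre_ (nonempty input) every
-- lookup taken here is in range, so the port is exact on Pre_.
def save_each_n_skeletons_alt (skeletons : List (List Int)) : List (Option (List Int)) :=
  -- m = (len(skeletons) + 2) // 4, inlined
  (List.range (4 * ((skeletons.length + 2) / 4) + 1)).map (fun (j : Nat) =>
    if j = 0 then PySem.List.pyGet? skeletons 0
    else if j % 4 = 0 then PySem.List.pyGet? skeletons ((j : Int) - 3)
    else none)

-- ===== PRECONDITION & SPEC =====
-- Pre_ excludes only the empty list, on which A (and B) raise IndexError.
def Pre_save_each_n_skeletons (skeletons : List (List Int)) : Prop := skeletons ≠ []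
instance (skeletons : List (List Int)) : Decidable (Pre_save_each_n_skeletons skeletons) := by unfold Pre_save_each_n_skeletons; infer_instance
def pvWitness_save_each_n_skeletons : List (List Int) := [[1, 2], [3], [4], [5], [6], [7]]
def Spec_save_each_n_skeletons (skeletons : List (List Int)) (out : List (Option (List Int))) : Prop := out = save_each_n_skeletons_alt skeletons
instance (skeletons : List (List Int)) (out : List (Option (List Int))) : Decidable (Spec_save_each_n_skeletons skeletons out) := by unfold Spec_save_each_n_skeletons; infer_instance

-- ===== CLAIM (what is proved, stated in full; the proofs are below) =====
def Claim_equal_save_each_n_skeletons : Prop := ∀ (skeletons : List (List Int)), Dom_save_each_n_skeletons skeletons → Pre_save_each_n_skeletons skeletons → Spec_save_each_n_skeletons skeletons (save_each_n_skeletons skeletons)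

-- ===== LEMMAS AND PROOFS =====

-- A's loop builds init ++ flatMap of the 4-block.
theorem pvA_foldl_flatMap (sub : List (List Int)) (init : List (Option (List Int))) :
    sub.foldl (fun acc sk => (acc ++ [none, none, none]) ++ [some sk]) init
      = init ++ sub.flatMap (fun sk => [none, none, none, some sk]) := by
  induction sub generalizing init with
  | nil => simp
  | cons sk tl ih => simp [List.foldl_cons, List.flatMap]

-- The slice skeletons[1::4] is exactly the strided index selection.
theorem pvSub_eq (xs : List (List Int)) (hne : xs ≠ []) :
    (PySem.List.slice? xs (some 1) none 4).getD []
      = List.filterMap (fun k => xs[4 * k + 1]?) (List.range ((xs.length + 2) / 4)) := by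
  have hn : 1 ≤ xs.length := List.length_pos_of_ne_nil hne
  simp only [PySem.List.slice?, PySem.List.sliceIndices]
  norm_num
  have hs : min (1 : Int) (xs.length : Int) = 1 := by omega
  rw [hs]
  have hcount : (if 1 < xs.length then (((xs.length : Int) - 1 + 4 - 1) / 4).toNat else 0)
      = (xs.length + 2) / 4 := by
    by_cases h : 1 < xs.length
    · simp only [if_pos h]; omega
    · simp only [if_neg h]; omega
  rw [hcount]
  apply List.filterMap_congr
  intro k _
  congr 1
  omega

-- Strided filterMap of in-range lookups, expanded through the 4-block flatMap.
theorem pvFlat (xs : List (List Int)) (m : Nat) (hm : 4 * m ≤ xs.length + 2) :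
    (List.filterMap (fun k => xs[4 * k + 1]?) (List.range m)).flatMap
        (fun sk => [none, none, none, some sk])
      = (List.range m).flatMap
          (fun k => [none, none, none, PySem.List.pyGet? xs ((4 * k + 1 : Nat) : Int)]) := by
  induction m with
  | zero => simp
  | succ m ih =>
    rw [List.range_succ, List.filterMap_append, List.flatMap_append, List.flatMap_append,
        ih (by omega)]
    have hlt : 4 * m + 1 < xs.length := by omega
    have hget : xs[4 * m + 1]? = some xs[4 * m + 1] := List.getElem?_eq_getElem hlt
    simp only [List.filterMap_cons, List.filterMap_nil, hget, List.flatMap_cons,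
      List.flatMap_nil, List.append_nil, PySem.List.pyGet?_natCast]

-- B's index-indexed comprehension, peeled a 4-block at a time from the right.
theorem pvB_range (xs : List (List Int)) (h0 : Option (List Int)) (m : Nat) :
    (List.range (4 * m + 1)).map (fun (j : Nat) =>
        if j = 0 then h0
        else if j % 4 = 0 then PySem.List.pyGet? xs ((j : Int) - 3)
        else none)
      = h0 :: (List.range m).flatMap
          (fun k => [none, none, none, PySem.List.pyGet? xs ((4 * k + 1 : Nat) : Int)]) := by
  induction m with
  | zero => simp
  | succ m ih =>
    have h : 4 * (m + 1) + 1 = ((((4 * m + 1) + 1) + 1) + 1) + 1 := by ring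
    rw [h, List.range_succ, List.range_succ, List.range_succ, List.range_succ,
        List.map_append, List.map_append, List.map_append, List.map_append, ih,
        List.range_succ, List.flatMap_append]
    have h1 : (4 * m + 1) % 4 = 1 := by omega
    have h2 : (4 * m + 1 + 1) % 4 = 2 := by omega
    have h3 : (4 * m + 1 + 1 + 1) % 4 = 3 := by omega
    have h4 : (4 * m + 1 + 1 + 1 + 1) % 4 = 0 := by omega
    simp [h1, h2, h3, h4, List.flatMap]
    congr 1
    ring

-- ===== VERDICT (by name: the statement is the Claim_ definition above) =====
theorem save_each_n_skeletons_spec : Claim_equal_save_each_n_skeletons := by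
  intro skeletons _ hpre
  unfold Spec_save_each_n_skeletons save_each_n_skeletons save_each_n_skeletons_alt
  cases skeletons with
  | nil => exact absurd rfl hpre
  | cons first rest =>
    rw [PySem.List.pyGet?_zero_cons]
    show ((PySem.List.slice? (first :: rest) (some 1) none 4).getD []).foldl
        (fun acc sk => (acc ++ ((List.range 3).map fun _ => (none : Option (List Int)))) ++ [some sk]) [some first]
      = (List.range (4 * (((first :: rest).length + 2) / 4) + 1)).map (fun (j : Nat) =>
          if j = 0 then some first
          else if j % 4 = 0 then PySem.List.pyGet? (first :: rest) ((j : Int) - 3)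
          else none)
    have hel : ((List.range 3).map fun (_ : Nat) => (none : Option (List Int))) = [none, none, none] := by decide
    have hm : ∀ n : Nat, 4 * ((n + 2) / 4) ≤ n + 2 := fun n => by omega
    rw [hel, pvA_foldl_flatMap, pvSub_eq (first :: rest) (by simp),
        pvFlat (first :: rest) _ (hm _), pvB_range (first :: rest) (some first)]
    simp
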